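-- pv_equiv track=rewrite | github.com/vserosinkas-star/registration-app | api/index.py | format_report_message
-- ===== SOURCE A (Python) =====
-- def format_report_message(registrations):
--     if not registrations:
--         return None
--     kic_groups = {}
--     for reg in registrations:
--         kic = reg.get('subdivision') or 'Без КИЦ'
--         kic_groups.setdefault(kic, []).append(reg['fio'])
--     lines = []
--     for kic, fios in sorted(kic_groups.items()):
--         lines.append(f"🟢 КИЦ {kic}")
--         lines.extend(f"👮 {fio}" for fio in fios)
--         lines.append("")
--     total = len(registrations)
--     lines.append(f"📨 Итого: {total} {pluralize(total, 'человек', 'человека', 'человек')}")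
--     return "\n".join(lines).strip()
--
-- def pluralize(n, one, few, many):
--     n = abs(n) % 100
--     n1 = n % 10
--     if 10 < n < 20: return many
--     if 1 < n1 < 5: return few
--     if n1 == 1: return one
--     return many
-- ===== SOURCE B (Python) =====
-- def format_report_message(registrations):
--     # Same report, different strategy: stable-sort (kic, fio) pairs by kic, then
--     # one adjacent-grouping pass; the plural word is computed inline (one == many).
--     if not registrations:
--         return None
--     pairs = sorted(
--         [(reg.get('subdivision') or 'Без КИЦ', reg['fio']) for reg in registrations],
--         key=lambda p: p[0],
--     )
--     lines = []
--     prev = None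
--     for kic, fio in pairs:
--         if kic != prev:
--             if prev is not None:
--                 lines.append("")
--             lines.append(f"🟢 КИЦ {kic}")
--             prev = kic
--         lines.append(f"👮 {fio}")
--     lines.append("")
--     total = len(registrations)
--     n = total % 100
--     word = 'человека' if 1 < n % 10 < 5 and not 10 < n < 20 else 'человек'
--     lines.append(f"📨 Итого: {total} {word}")
--     return "\n".join(lines).strip()
-- ===== Notes on version B (the rewrite author's own statement) =====
-- stated objective: alternative
-- what changed: B replaces A's dict-grouping (setdefault/append) followed by sorting the grouped items with a stable sort of (kic, fio) pairs by kic followed by a single adjacent-grouping pass with a prev tracker, and inlines the plural word (pluralize's one and many arguments coincide).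
import Mathlib
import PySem

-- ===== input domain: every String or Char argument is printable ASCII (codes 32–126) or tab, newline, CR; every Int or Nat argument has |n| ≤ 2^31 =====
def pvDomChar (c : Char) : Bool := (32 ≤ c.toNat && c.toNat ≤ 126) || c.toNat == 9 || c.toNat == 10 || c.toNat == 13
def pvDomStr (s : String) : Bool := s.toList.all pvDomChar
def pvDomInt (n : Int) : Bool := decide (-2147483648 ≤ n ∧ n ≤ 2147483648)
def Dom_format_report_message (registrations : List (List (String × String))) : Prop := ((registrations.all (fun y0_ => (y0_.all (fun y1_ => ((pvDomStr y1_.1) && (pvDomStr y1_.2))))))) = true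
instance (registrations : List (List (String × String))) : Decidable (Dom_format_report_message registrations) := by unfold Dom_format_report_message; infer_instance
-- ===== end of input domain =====

-- B replaces A's dict-group-then-sort-keys strategy by stable-sort-then-group-adjacent
-- (and inlines the plural word, since pluralize's `one` and `many` arguments coincide);
-- same report text, alternative algorithm of similar cost.

-- ===== PORT A =====
-- reg.get('subdivision') or 'Без КИЦ' : the `or` falls through on None AND on ''
def regKic (reg : List (String × String)) : String :=
  match PySem.Dict.get? ⟨reg⟩ "subdivision" with
  | some s => if s = "" then "Без КИЦ" else s
  | none => "Без КИЦ"

-- reg['fio'] : Pre_ guarantees the key is present, so the default is never used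
def regFio (reg : List (String × String)) : String :=
  PySem.Dict.getD ⟨reg⟩ "fio" ""

def pluralize (n : Int) (one few many : String) : String :=
  let n2 : Int := PySem.Int.mod ((n.natAbs : Int)) 100
  let n1 : Int := PySem.Int.mod n2 10
  if 10 < n2 ∧ n2 < 20 then many
  else if 1 < n1 ∧ n1 < 5 then few
  else if n1 = 1 then one
  else many

def format_report_message (registrations : List (List (String × String))) : Option String :=
  if registrations = [] then none else
  let kic_groups : PySem.Dict String (List String) :=
    registrations.foldl (fun d reg =>
      let kic := regKic reg
      d.insert kic (d.getD kic [] ++ [regFio reg])) ⟨[]⟩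
  -- sorted(kic_groups.items()): dict keys are distinct, so Python's tuple order = key order (exact here)
  let items := PySem.List.sorted kic_groups.items (fun p => p.1) false
  let lines : List String :=
    items.foldl (fun ls q =>
      ((ls ++ ["🟢 КИЦ " ++ q.1]) ++ q.2.map (fun fio => "👮 " ++ fio)) ++ [""]) []
  let total : Int := (registrations.length : Int)
  let lines := lines ++
    ["📨 Итого: " ++ PySem.Int.toStr total ++ " " ++ pluralize total "человек" "человека" "человек"]
  some (PySem.Str.strip (PySem.Str.join "\n" lines))

-- ===== PORT B =====
-- one step of B's adjacent-grouping loop: state = (lines, prev)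
def bStep (acc : List String × Option String) (p : String × String) : List String × Option String :=
  let s := if some p.1 ≠ acc.2 then
      ((if acc.2 = none then acc.1 else acc.1 ++ [""]) ++ ["🟢 КИЦ " ++ p.1], some p.1)
    else (acc.1, acc.2)
  (s.1 ++ ["👮 " ++ p.2], s.2)

def format_report_message_alt (registrations : List (List (String × String))) : Option String :=
  if registrations = [] then none else
  let pairs := PySem.List.sorted
    (registrations.map (fun reg => (regKic reg, regFio reg))) (fun p => p.1) false
  let st := pairs.foldl bStep ([], none)
  let lines := st.1 ++ [""]
  let total : Int := (registrations.length : Int)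
  let n : Int := PySem.Int.mod total 100
  let word := if (1 < PySem.Int.mod n 10 ∧ PySem.Int.mod n 10 < 5) ∧ ¬ (10 < n ∧ n < 20)
    then "человека" else "человек"
  let lines := lines ++ ["📨 Итого: " ++ PySem.Int.toStr total ++ " " ++ word]
  some (PySem.Str.strip (PySem.Str.join "\n" lines))

-- ===== PRECONDITION & SPEC =====
-- Pre_ excludes registrations records without a 'fio' key, on which A raises KeyError.
def Pre_format_report_message (registrations : List (List (String × String))) : Prop :=
  ∀ reg ∈ registrations, "fio" ∈ reg.map Prod.fst
instance (registrations : List (List (String × String))) : Decidable (Pre_format_report_message registrations) := by unfold Pre_format_report_message; infer_instance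

def pvWitness_format_report_message : (List (List (String × String))) :=
  [[("fio", "Ivanov I I")], [("fio", "Petrov P P"), ("subdivision", "KIC 1")]]

def Spec_format_report_message (registrations : List (List (String × String))) (out : Option String) : Prop := out = format_report_message_alt registrations
instance (registrations : List (List (String × String))) (out : Option String) : Decidable (Spec_format_report_message registrations out) := by unfold Spec_format_report_message; infer_instance

-- ===== CLAIM (what is proved, stated in full; the proofs are below) =====
def Claim_equal_format_report_message : Prop := ∀ (registrations : List (List (String × String))), Dom_format_report_message registrations → Pre_format_report_message registrations → Spec_format_report_message registrations (format_report_message registrations)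

-- ===== LEMMAS AND PROOFS =====

-- ---- the canonical key→fios table (proof-side only) ----

def canonKeys (ps : List (String × String)) : List String :=
  PySem.List.dedup (ps.map Prod.fst)

def grp (ps : List (String × String)) (k : String) : List (String × String) :=
  ps.filter (fun p => p.1 == k)

def canon (ps : List (String × String)) : List (String × List String) :=
  (canonKeys ps).map (fun k => (k, (grp ps k).map Prod.snd))

def sortedKeys (ps : List (String × String)) : List String :=
  PySem.List.sorted (canonKeys ps) (fun k => k) false

lemma mem_canonKeys (ps : List (String × String)) (k : String) :
    k ∈ canonKeys ps ↔ k ∈ ps.map Prod.fst := PySem.Set.mem_ofList _ _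

lemma nodup_canonKeys (ps : List (String × String)) : (canonKeys ps).Nodup :=
  PySem.Set.nodup_ofList _

lemma mem_sortedKeys (ps : List (String × String)) (k : String) :
    k ∈ sortedKeys ps ↔ k ∈ ps.map Prod.fst := by
  rw [sortedKeys, PySem.List.mem_sorted, mem_canonKeys]

lemma pairwise_sortedKeys (ps : List (String × String)) :
    (sortedKeys ps).Pairwise (· < ·) := PySem.List.sorted_ofList_pairwise_lt _

lemma grp_key (ps : List (String × String)) (k : String) :
    ∀ q ∈ grp ps k, q.1 = k := by
  intro q hq
  have := List.of_mem_filter hq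
  simpa using this

lemma grp_ne_nil (ps : List (String × String)) (k : String) (hk : k ∈ ps.map Prod.fst) :
    grp ps k ≠ [] := by
  obtain ⟨q, hq, hk⟩ := List.mem_map.mp hk
  exact List.ne_nil_of_mem (List.mem_filter.mpr ⟨hq, by simp [hk]⟩)

lemma grp_nil_of_not_mem (ps : List (String × String)) (k : String)
    (hk : k ∉ ps.map Prod.fst) : grp ps k = [] := by
  rw [grp, List.filter_eq_nil_iff]
  intro q hq
  simp only [beq_iff_eq]
  intro h
  exact hk (List.mem_map.mpr ⟨q, hq, h⟩)

lemma grp_append_singleton (ps : List (String × String)) (p : String × String) (k : String) :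
    grp (ps ++ [p]) k = grp ps k ++ (if p.1 = k then [p] else []) := by
  rw [grp, grp, List.filter_append]
  congr 1
  by_cases h : p.1 = k
  · simp [List.filter, h]
  · have hb : (p.1 == k) = false := by simp [h]
    simp [List.filter, hb, h]

lemma dedup_append_singleton (xs : List String) (a : String) :
    PySem.List.dedup (xs ++ [a]) =
      if a ∈ xs then PySem.List.dedup xs else PySem.List.dedup xs ++ [a] := by
  have h1 : PySem.List.dedup (xs ++ [a]) = PySem.Set.add (PySem.List.dedup xs) a := by
    simp [PySem.List.dedup, PySem.Set.ofList, List.foldl_append]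
  rw [h1, PySem.Set.add]
  have hmem := PySem.Set.mem_ofList xs a
  have hc : PySem.Set.contains (PySem.List.dedup xs) a = decide (a ∈ xs) := by
    by_cases hm : a ∈ xs
    · have : a ∈ PySem.List.dedup xs := hmem.mpr hm
      simp only [PySem.Set.contains, hm, decide_true]
      exact List.elem_eq_true_of_mem this
    · have : a ∉ PySem.List.dedup xs := fun h => hm (hmem.mp h)
      simp only [PySem.Set.contains, hm, decide_false]
      exact Bool.not_eq_true _ ▸ (by simpa using this)
  rw [hc]
  by_cases hm : a ∈ xs <;> simp [hm]

lemma canonKeys_append_singleton (ps : List (String × String)) (p : String × String) :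
    canonKeys (ps ++ [p]) =
      if p.1 ∈ ps.map Prod.fst then canonKeys ps else canonKeys ps ++ [p.1] := by
  rw [canonKeys, List.map_append, List.map_singleton, dedup_append_singleton]
  rfl

-- find? over the canonical (key, value) table
lemma find?_map_key (ks : List String) (hk : ks.Nodup) (g : String → List String) (k : String) :
    ((ks.map (fun c => (c, g c))).find? (fun q => q.1 == k)) =
      if k ∈ ks then some (k, g k) else none := by
  induction ks with
  | nil => simp
  | cons c t ih =>
    rcases List.nodup_cons.mp hk with ⟨hct, ht⟩
    by_cases hck : c = k
    · subst hck
      simp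
    · simp only [List.map_cons, List.find?]
      have hb : ((c, g c).1 == k) = false := by simp [hck]
      rw [hb, ih ht]
      by_cases hkt : k ∈ t <;> simp [hkt, Ne.symm hck]

lemma contains_canon (ps : List (String × String)) (k : String) :
    (PySem.Dict.mk (canon ps)).contains k = decide (k ∈ ps.map Prod.fst) := by
  have h1 : (PySem.Dict.mk (canon ps)).contains k
      = ((canonKeys ps).map (fun c => (c, (grp ps c).map Prod.snd))).any (fun p => p.1 == k) := rfl
  rw [h1, List.any_map]
  have h2 : ((fun (p : String × List String) => p.1 == k) ∘ (fun c => (c, (grp ps c).map Prod.snd)))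
      = fun c => c == k := rfl
  rw [h2]
  by_cases hm : k ∈ ps.map Prod.fst
  · have : k ∈ canonKeys ps := (mem_canonKeys ps k).mpr hm
    simp only [hm, decide_true]
    exact List.any_eq_true.mpr ⟨k, this, by simp⟩
  · have hnot : k ∉ canonKeys ps := fun h => hm ((mem_canonKeys ps k).mp h)
    simp only [hm, decide_false]
    exact List.any_eq_false.mpr (fun c hc => by
      simp only [beq_iff_eq]
      exact fun h => hnot (h ▸ hc))

lemma getD_canon (ps : List (String × String)) (k : String) :
    (PySem.Dict.mk (canon ps)).getD k [] =
      (if k ∈ ps.map Prod.fst then (grp ps k).map Prod.snd else []) := by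
  rw [PySem.Dict.getD, PySem.Dict.get?]
  have h1 : (PySem.Dict.mk (canon ps)).items = canon ps := rfl
  rw [h1, canon, find?_map_key _ (nodup_canonKeys ps)]
  by_cases hm : k ∈ ps.map Prod.fst
  · simp [hm, (mem_canonKeys ps k).mpr hm]
  · have : k ∉ canonKeys ps := fun h => hm ((mem_canonKeys ps k).mp h)
    simp [hm, this]

-- one snoc step of A's dict fold, on the canonical table
lemma canon_step (qs : List (String × String)) (p : String × String) :
    (PySem.Dict.mk (canon qs)).insert p.1
        ((PySem.Dict.mk (canon qs)).getD p.1 [] ++ [p.2]) =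
      PySem.Dict.mk (canon (qs ++ [p])) := by
  rw [PySem.Dict.insert, contains_canon, getD_canon]
  by_cases hm : p.1 ∈ qs.map Prod.fst
  · simp only [hm, decide_true, if_true]
    congr 1
    rw [canon, canon, canonKeys_append_singleton, if_pos hm, List.map_map]
    apply List.map_congr_left
    intro c hc
    by_cases hcp : c = p.1
    · subst hcp
      simp [grp_append_singleton]
    · have hb : (c == p.1) = false := by simp [hcp]
      simp only [Function.comp_apply, hb, Bool.false_eq_true, if_false]
      rw [grp_append_singleton]
      simp [Ne.symm hcp]
  · simp only [hm, decide_false, Bool.false_eq_true, if_false]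
    congr 1
    rw [canon, canon, canonKeys_append_singleton, if_neg hm, List.map_append,
      List.map_singleton]
    congr 1
    · apply List.map_congr_left
      intro c hc
      have hcp : c ≠ p.1 := fun h => hm (h ▸ (mem_canonKeys qs c).mp hc)
      rw [grp_append_singleton]
      simp [Ne.symm hcp]
    · rw [grp_append_singleton, grp_nil_of_not_mem qs p.1 hm]
      simp

lemma dict_fold_eq_canon (ps : List (String × String)) :
    (ps.foldl (fun d p => d.insert p.1 (d.getD p.1 [] ++ [p.2]))
      (⟨[]⟩ : PySem.Dict String (List String))) = PySem.Dict.mk (canon ps) := by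
  induction ps using List.reverseRecOn with
  | nil => rfl
  | append_singleton qs p ih =>
    rw [List.foldl_append, ih]
    simpa using canon_step qs p

-- A's sorted items = groups listed along the sorted distinct keys
lemma sorted_canon (ps : List (String × String)) :
    PySem.List.sorted (canon ps) (fun q => q.1) false =
      (sortedKeys ps).map (fun k => (k, (grp ps k).map Prod.snd)) := by
  apply PySem.List.sorted_eq_of_perm_of_pairwise_lt
  · exact List.Perm.map _ (PySem.List.sorted_perm _ _ _)
  · exact List.Pairwise.map _ (fun a b h => h) (pairwise_sortedKeys ps)

-- ---- stability of B's sort, via the insertion-sort characterisation ----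

def sortedInsert (k : String) : List String → List String
  | [] => [k]
  | c :: t => if k < c then k :: c :: t else if k = c then c :: t else c :: sortedInsert k t

lemma mem_sortedInsert (k x : String) (K : List String) :
    x ∈ sortedInsert k K ↔ x = k ∨ x ∈ K := by
  induction K with
  | nil => simp [sortedInsert]
  | cons c t ih =>
    by_cases h1 : k < c
    · simp [sortedInsert, h1]
    · by_cases h2 : k = c
      · subst h2
        simp [sortedInsert]
      · simp only [sortedInsert, if_neg h1, if_neg h2, List.mem_cons, ih]
        tauto

lemma sortedInsert_of_mem (k : String) (K : List String) (hK : K.Pairwise (· < ·))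
    (hm : k ∈ K) : sortedInsert k K = K := by
  induction K with
  | nil => simp at hm
  | cons c t ih =>
    rcases List.pairwise_cons.mp hK with ⟨hct, ht⟩
    rcases List.mem_cons.mp hm with h | h
    · subst h
      simp [sortedInsert]
    · have hck : c < k := hct k h
      have h1 : ¬ k < c := not_lt_of_gt hck
      have h2 : k ≠ c := ne_of_gt hck
      simp [sortedInsert, h1, h2, ih ht h]

lemma sortedInsert_perm (k : String) (K : List String) (hm : k ∉ K) :
    (sortedInsert k K).Perm (K ++ [k]) := by
  induction K with
  | nil => simp [sortedInsert]
  | cons c t ih =>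
    have hkc : k ≠ c := fun h => hm (h ▸ List.mem_cons_self)
    have hkt : k ∉ t := fun h => hm (List.mem_cons_of_mem _ h)
    by_cases h1 : k < c
    · simpa [sortedInsert, h1] using (List.perm_append_singleton k (c :: t)).symm
    · rw [sortedInsert, if_neg h1, if_neg hkc, List.cons_append]
      exact ((ih hkt).cons c)

lemma sortedInsert_pairwise (k : String) (K : List String) (hK : K.Pairwise (· < ·))
    (hm : k ∉ K) : (sortedInsert k K).Pairwise (· < ·) := by
  induction K with
  | nil => simp [sortedInsert]
  | cons c t ih =>
    rcases List.pairwise_cons.mp hK with ⟨hct, ht⟩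
    have hkc : k ≠ c := fun h => hm (h ▸ List.mem_cons_self)
    have hkt : k ∉ t := fun h => hm (List.mem_cons_of_mem _ h)
    by_cases h1 : k < c
    · rw [sortedInsert, if_pos h1]
      refine List.pairwise_cons.mpr ⟨?_, hK⟩
      intro x hx
      rcases List.mem_cons.mp hx with h | h
      · exact h ▸ h1
      · exact h1.trans (hct x h)
    · have hck : c < k := lt_of_le_of_ne (not_lt.mp h1) (Ne.symm hkc)
      rw [sortedInsert, if_neg h1, if_neg hkc]
      refine List.pairwise_cons.mpr ⟨?_, ih ht hkt⟩
      intro x hx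
      rcases (mem_sortedInsert k x t).mp hx with h | h
      · exact h ▸ hck
      · exact hct x h

lemma insertBy_append_left {α : Type} (before : α → α → Bool) (x : α) (as bs : List α)
    (h : ∀ a ∈ as, before x a = false) :
    PySem.List.insertBy before x (as ++ bs) = as ++ PySem.List.insertBy before x bs := by
  induction as with
  | nil => simp
  | cons a t ih =>
    have ha : before x a = false := h a (List.mem_cons_self)
    simp only [List.cons_append, PySem.List.insertBy, ha, Bool.false_eq_true, if_false]
    rw [ih (fun a ha => h a (List.mem_cons_of_mem _ ha))]

lemma insertBy_cons_of_forall_before {α : Type} (before : α → α → Bool) (x : α) (l : List α)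
    (h : ∀ y ∈ l, before x y = true) :
    PySem.List.insertBy before x l = x :: l := by
  cases l with
  | nil => rfl
  | cons a t =>
    have := h a (List.mem_cons_self)
    simp [PySem.List.insertBy, this]

lemma insertBy_flatMap (p : String × String) (K : List String)
    (G : String → List (String × String))
    (hK : K.Pairwise (· < ·))
    (hkey : ∀ c ∈ K, ∀ q ∈ G c, q.1 = c)
    (hne : ∀ c ∈ K, G c ≠ [])
    (h0 : p.1 ∉ K → G p.1 = []) :
    PySem.List.insertBy (fun a b => decide (a.1 < b.1)) p (K.flatMap G) =
      (sortedInsert p.1 K).flatMap (fun c => G c ++ if c = p.1 then [p] else []) := by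
  induction K with
  | nil =>
    have hGp := h0 (by simp)
    simp [sortedInsert, PySem.List.insertBy, hGp]
  | cons c t ih =>
    rcases List.pairwise_cons.mp hK with ⟨hct, ht⟩
    have hGc := hne c (List.mem_cons_self)
    have hkc := hkey c (List.mem_cons_self)
    obtain ⟨q, qs, hq⟩ := List.exists_cons_of_ne_nil hGc
    have hq1 : q.1 = c := hkc q (by rw [hq]; exact List.mem_cons_self)
    by_cases h1 : p.1 < c
    · -- p goes in front; p.1 is fresh
      have hfresh : p.1 ∉ c :: t := by
        intro hmem
        rcases List.mem_cons.mp hmem with h | h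
        · exact absurd (h ▸ h1) (lt_irrefl c)
        · exact absurd (h1.trans (hct _ h)) (lt_irrefl p.1)
      have hGp := h0 hfresh
      have hpc : c ≠ p.1 := fun h => hfresh (by rw [h]; exact List.mem_cons_self)
      have htp : ∀ a ∈ t, a ≠ p.1 := fun a ha h =>
        hfresh (by rw [← h]; exact List.mem_cons_of_mem _ ha)
      have hbefore : ∀ y ∈ q :: (qs ++ List.flatMap G t),
          (fun a b : String × String => decide (a.1 < b.1)) p y = true := by
        intro y hy
        apply decide_eq_true
        rcases List.mem_cons.mp hy with h | h
        · rw [h, hq1]; exact h1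
        · rcases List.mem_append.mp h with h | h
          · have : y ∈ G c := by rw [hq]; exact List.mem_cons_of_mem _ h
            rw [hkc y this]; exact h1
          · obtain ⟨c', hc', hy'⟩ := List.mem_flatMap.mp h
            rw [hkey c' (List.mem_cons_of_mem _ hc') y hy']
            exact h1.trans (hct c' hc')
      have hmapt : List.flatMap (fun c' => G c' ++ if c' = p.1 then [p] else []) t =
          List.flatMap G t := by
        rw [List.flatMap, List.flatMap]
        congr 1
        exact List.map_congr_left (fun a ha => by rw [if_neg (htp a ha), List.append_nil])
      rw [List.flatMap_cons, hq, List.cons_append,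
        insertBy_cons_of_forall_before _ _ _ hbefore,
        sortedInsert, if_pos h1, List.flatMap_cons, List.flatMap_cons,
        hmapt, hGp, if_pos rfl, if_neg hpc, List.append_nil, hq]
      simp
    · by_cases h2 : p.1 = c
      · -- p joins the first group, at its end
        have hskip : ∀ x ∈ G c, (fun a b : String × String => decide (a.1 < b.1)) p x = false := by
          intro x hx
          apply decide_eq_false
          rw [hkc x hx, h2]
          exact lt_irrefl _
        have hall : ∀ y ∈ List.flatMap G t,
            (fun a b : String × String => decide (a.1 < b.1)) p y = true := by
          intro y hy
          obtain ⟨c', hc', hy'⟩ := List.mem_flatMap.mp hy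
          apply decide_eq_true
          rw [hkey c' (List.mem_cons_of_mem _ hc') y hy', h2]
          exact hct c' hc'
        have htp : ∀ a ∈ t, a ≠ p.1 := by
          intro a ha h
          have := hct a ha
          rw [h, h2] at this
          exact lt_irrefl c this
        have hmapt : List.flatMap (fun c' => G c' ++ if c' = p.1 then [p] else []) t =
            List.flatMap G t := by
          rw [List.flatMap, List.flatMap]
          congr 1
          exact List.map_congr_left (fun a ha => by rw [if_neg (htp a ha), List.append_nil])
        rw [List.flatMap_cons, insertBy_append_left _ _ _ _ hskip,
          insertBy_cons_of_forall_before _ _ _ hall,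
          sortedInsert, if_neg h1, if_pos h2, List.flatMap_cons, hmapt, if_pos h2.symm]
        simp
      · -- p belongs further right
        have hck : c < p.1 := lt_of_le_of_ne (not_lt.mp h1) (Ne.symm h2)
        have hskip : ∀ x ∈ G c, (fun a b : String × String => decide (a.1 < b.1)) p x = false := by
          intro x hx
          apply decide_eq_false
          rw [hkc x hx]
          exact not_lt_of_gt hck
        have hrec := ih ht (fun c hc => hkey c (List.mem_cons_of_mem _ hc))
          (fun c hc => hne c (List.mem_cons_of_mem _ hc))
          (fun hm => h0 (fun hmem => by
            rcases List.mem_cons.mp hmem with h | h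
            · exact h2 h
            · exact hm h))
        rw [List.flatMap_cons, insertBy_append_left _ _ _ _ hskip, hrec,
          sortedInsert, if_neg h1, if_neg h2, List.flatMap_cons,
          if_neg (fun h : c = p.1 => h2 h.symm), List.append_nil]

lemma sorted_snoc (qs : List (String × String)) (p : String × String) :
    PySem.List.sorted (qs ++ [p]) (fun q => q.1) false =
      PySem.List.insertBy (fun a b => decide (a.1 < b.1)) p
        (PySem.List.sorted qs (fun q => q.1) false) := by
  rw [PySem.List.sorted_eq_foldl_insertBy, PySem.List.sorted_eq_foldl_insertBy,
    List.foldl_append]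
  rfl

lemma sortedKeys_append_singleton (qs : List (String × String)) (p : String × String) :
    sortedKeys (qs ++ [p]) = sortedInsert p.1 (sortedKeys qs) := by
  by_cases hm : p.1 ∈ qs.map Prod.fst
  · rw [sortedKeys, canonKeys_append_singleton, if_pos hm,
      sortedInsert_of_mem p.1 (sortedKeys qs) (pairwise_sortedKeys qs)
        ((mem_sortedKeys qs p.1).mpr hm)]
    rfl
  · have hnotin : p.1 ∉ sortedKeys qs := fun h => hm ((mem_sortedKeys qs p.1).mp h)
    rw [sortedKeys, canonKeys_append_singleton, if_neg hm]
    apply PySem.List.sorted_eq_of_perm_of_pairwise_lt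
    · exact (sortedInsert_perm p.1 (sortedKeys qs) hnotin).trans
        (List.Perm.append_right [p.1] (PySem.List.sorted_perm _ _ _))
    · exact sortedInsert_pairwise p.1 _ (pairwise_sortedKeys qs) hnotin

lemma sorted_pairs_eq_flatMap (ps : List (String × String)) :
    PySem.List.sorted ps (fun p => p.1) false =
      (sortedKeys ps).flatMap (grp ps) := by
  induction ps using List.reverseRecOn with
  | nil => rfl
  | append_singleton qs p ih =>
    rw [sorted_snoc, ih,
      insertBy_flatMap p (sortedKeys qs) (grp qs) (pairwise_sortedKeys qs)
        (fun c _ => grp_key qs c)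
        (fun c hc => grp_ne_nil qs c ((mem_sortedKeys qs c).mp hc))
        (fun hm => grp_nil_of_not_mem qs p.1 (fun h => hm ((mem_sortedKeys qs p.1).mpr h))),
      sortedKeys_append_singleton]
    rw [List.flatMap, List.flatMap]
    congr 1
    apply List.map_congr_left
    intro c _
    rw [grp_append_singleton]
    by_cases h : p.1 = c
    · simp [h]
    · simp [h, Ne.symm h]

-- ---- B's grouping loop over the flattened groups ----

lemma bfold_group (c : String) (qs : List (String × String))
    (h : ∀ q ∈ qs, q.1 = c) (ls : List String) :
    qs.foldl bStep (ls, some c) = (ls ++ qs.map (fun q => "👮 " ++ q.2), some c) := by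
  induction qs generalizing ls with
  | nil => simp
  | cons q t ih =>
    have hq : q.1 = c := h q (List.mem_cons_self)
    have hstep : bStep (ls, some c) q = (ls ++ ["👮 " ++ q.2], some c) := by
      simp [bStep, hq]
    rw [List.foldl_cons, hstep, ih (fun x hx => h x (List.mem_cons_of_mem _ hx))]
    simp

lemma bfold_groups (K : List String) (G : String → List (String × String)) (c0 : String)
    (hgt : ∀ c ∈ K, c0 < c) (hK : K.Pairwise (· < ·))
    (hne : ∀ c ∈ K, G c ≠ []) (hkey : ∀ c ∈ K, ∀ q ∈ G c, q.1 = c) (ls : List String) :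
    (K.flatMap G).foldl bStep (ls, some c0) =
      (ls ++ K.flatMap (fun c => ["", "🟢 КИЦ " ++ c] ++ (G c).map (fun q => "👮 " ++ q.2)),
        some (K.getLastD c0)) := by
  induction K generalizing c0 ls with
  | nil => simp
  | cons c t ih =>
    rcases List.pairwise_cons.mp hK with ⟨hct, ht⟩
    obtain ⟨q, qs, hq⟩ := List.exists_cons_of_ne_nil (hne c (List.mem_cons_self))
    have hkc := hkey c (List.mem_cons_self)
    have hq1 : q.1 = c := hkc q (by rw [hq]; exact List.mem_cons_self)
    have hcc0 : c ≠ c0 := Ne.symm (ne_of_lt (hgt c (List.mem_cons_self)))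
    have hstep : bStep (ls, some c0) q =
        ((ls ++ [""]) ++ ["🟢 КИЦ " ++ c] ++ ["👮 " ++ q.2], some c) := by
      simp [bStep, hq1, hcc0]
    rw [List.flatMap_cons, hq, List.foldl_append, List.foldl_cons, hstep,
      bfold_group c qs (fun x hx => hkc x (by rw [hq]; exact List.mem_cons_of_mem _ hx)) _,
      ih c hct ht (fun k hk => hne k (List.mem_cons_of_mem _ hk))
        (fun k hk => hkey k (List.mem_cons_of_mem _ hk)) _]
    rw [List.flatMap_cons, List.getLastD_cons]
    simp [hq]

-- "" after every group = "" before every later group, plus one trailing ""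
lemma blank_shift (hdrf : String → List String) (t : List String) :
    (t.flatMap (fun c => "" :: hdrf c)) ++ [""] =
      "" :: t.flatMap (fun c => hdrf c ++ [""]) := by
  induction t with
  | nil => simp
  | cons c t ih => simp [List.flatMap_cons, ih]

lemma emit_eq (ps : List (String × String)) (hps : ps ≠ []) :
    (((sortedKeys ps).flatMap (grp ps)).foldl bStep ([], none)).1 ++ [""] =
      ((sortedKeys ps).map (fun k => (k, (grp ps k).map Prod.snd))).foldl
        (fun ls q => ((ls ++ ["🟢 КИЦ " ++ q.1]) ++ q.2.map (fun fio => "👮 " ++ fio)) ++ [""]) [] := by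
  have hK : (sortedKeys ps) ≠ [] := by
    rw [sortedKeys, Ne, PySem.List.sorted_eq_nil_iff]
    intro h
    rcases List.exists_cons_of_ne_nil hps with ⟨q, qs, rfl⟩
    have : q.1 ∈ canonKeys (q :: qs) := (mem_canonKeys _ _).mpr (by simp)
    rw [h] at this
    simp at this
  obtain ⟨c, t, hKt⟩ := List.exists_cons_of_ne_nil hK
  have hpw := pairwise_sortedKeys ps
  rw [hKt] at hpw
  rcases List.pairwise_cons.mp hpw with ⟨hct, ht⟩
  have hne : ∀ k ∈ sortedKeys ps, grp ps k ≠ [] :=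
    fun k hk => grp_ne_nil ps k ((mem_sortedKeys ps k).mp hk)
  rw [hKt] at hne
  -- A's foldl as a flatMap
  have hA : ∀ (L : List (String × List String)),
      L.foldl (fun ls q => ((ls ++ ["🟢 КИЦ " ++ q.1]) ++ q.2.map (fun fio => "👮 " ++ fio)) ++ [""]) [] =
        L.flatMap (fun q => ("🟢 КИЦ " ++ q.1) :: (q.2.map (fun fio => "👮 " ++ fio) ++ [""])) := by
    intro L
    have hfn : (fun (ls : List String) (q : String × List String) =>
        ((ls ++ ["🟢 КИЦ " ++ q.1]) ++ q.2.map (fun fio => "👮 " ++ fio)) ++ [""]) =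
        (fun ls q => ls ++ (("🟢 КИЦ " ++ q.1) :: (q.2.map (fun fio => "👮 " ++ fio) ++ [""]))) := by
      funext ls q
      simp
    rw [hfn, PySem.List.foldl_append_eq_flatMap]
    simp
  -- B's fold, group by group
  obtain ⟨q, qs, hq⟩ := List.exists_cons_of_ne_nil (hne c (List.mem_cons_self))
  have hkc := grp_key ps c
  have hq1 : q.1 = c := hkc q (by rw [hq]; exact List.mem_cons_self)
  have hstep : bStep (([] : List String), (none : Option String)) q =
      (["🟢 КИЦ " ++ c] ++ ["👮 " ++ q.2], some c) := by
    simp [bStep, hq1]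
  rw [hKt, List.flatMap_cons, hq, List.foldl_append, List.foldl_cons, hstep,
    bfold_group c qs (fun x hx => hkc x (by rw [hq]; exact List.mem_cons_of_mem _ hx)) _,
    bfold_groups t (grp ps) c hct ht
      (fun k hk => hne k (List.mem_cons_of_mem _ hk))
      (fun k _ => grp_key ps k) _,
    hA, List.flatMap_map, List.flatMap_cons]
  simp only [List.cons_append, List.nil_append, List.append_assoc]
  rw [blank_shift (fun k => ("🟢 КИЦ " ++ k) :: (grp ps k).map (fun x => "👮 " ++ x.2)) t]
  simp [hq, List.map_map, Function.comp_def, List.cons_append]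

lemma plural_eq (t : Int) (ht : 0 ≤ t) :
    pluralize t "человек" "человека" "человек" =
      (if (1 < PySem.Int.mod (PySem.Int.mod t 100) 10 ∧ PySem.Int.mod (PySem.Int.mod t 100) 10 < 5) ∧
          ¬ (10 < PySem.Int.mod t 100 ∧ PySem.Int.mod t 100 < 20)
        then "человека" else "человек") := by
  have e1 : PySem.Int.mod t 100 = t % 100 := PySem.Int.mod_eq_emod_of_pos (by norm_num)
  have e2 : ∀ m : Int, PySem.Int.mod m 10 = m % 10 := fun m =>
    PySem.Int.mod_eq_emod_of_pos (by norm_num)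
  unfold pluralize
  rw [Int.natAbs_of_nonneg ht]
  simp only [e1, e2]
  split_ifs <;> first | rfl | omega

-- ===== VERDICT (by name: the statement is the Claim_ definition above) =====
theorem format_report_message_spec : Claim_equal_format_report_message := by
  intro registrations _hdom _hpre
  unfold Spec_format_report_message format_report_message format_report_message_alt
  by_cases hempty : registrations = []
  · rw [if_pos hempty, if_pos hempty]
  · rw [if_neg hempty, if_neg hempty]
    set ps := registrations.map (fun reg => (regKic reg, regFio reg)) with hps
    have hpsne : ps ≠ [] := by
      rw [hps]
      simp [hempty]
    have hfold : (registrations.foldl (fun d reg =>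
        d.insert (regKic reg) (d.getD (regKic reg) [] ++ [regFio reg]))
        (⟨[]⟩ : PySem.Dict String (List String))) =
        ps.foldl (fun d p => d.insert p.1 (d.getD p.1 [] ++ [p.2])) ⟨[]⟩ := by
      rw [hps, List.foldl_map]
    simp only [hfold, dict_fold_eq_canon]
    rw [sorted_canon, sorted_pairs_eq_flatMap, emit_eq ps hpsne,
      plural_eq (registrations.length : Int) (by positivity)]
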